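-- pv_equiv track=rewrite | github.com/zakgen/backend | app/services/messaging_service.py | _extract_order_reference_candidates
-- ===== SOURCE A (Python) =====
-- def _extract_order_reference_candidates(message: str) -> list[str]:
--     candidates: list[str] = []
--     token = []
--     for char in message:
--         if char.isalnum() or char in {"-", "_", "#"}:
--             token.append(char)
--             continue
--         if token:
--             candidates.append("".join(token))
--             token = []
--     if token:
--         candidates.append("".join(token))
--     normalized: list[str] = []
--     for candidate in candidates:
--         stripped = candidate.strip().lstrip("#").rstrip(".,!?;:")
--         if len(stripped) < 4 or not any(ch.isdigit() for ch in stripped):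
--             continue
--         if stripped not in normalized:
--             normalized.append(stripped)
--     return normalized
-- ===== SOURCE B (Python) =====
-- def _is_ref_char(c):
--     return c.isalnum() or c in "-_#"
--
--
-- def _extract_order_reference_candidates(message: str) -> list[str]:
--     out: list[str] = []
--     seen = set()
--     n = len(message)
--     i = 0
--     while i < n:
--         if not _is_ref_char(message[i]):
--             i += 1
--             continue
--         j = i + 1
--         while j < n and _is_ref_char(message[j]):
--             j += 1
--         stripped = message[i:j].strip().lstrip("#").rstrip(".,!?;:")
--         i = j
--         if len(stripped) >= 4 and any(ch.isdigit() for ch in stripped) and stripped not in seen: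
--             seen.add(stripped)
--             out.append(stripped)
--     return out
-- ===== Notes on version B (the rewrite author's own statement) =====
-- stated objective: alternative
-- what changed: B replaces A's two staged passes (char-accumulator tokenization building a candidates list, then a normalize/filter/dedup pass with list-membership) by one fused index-based scan: two-pointer while loops locate each maximal run, which is normalized, filtered and deduped (hash set) immediately, with no intermediate candidates list.
import Mathlib
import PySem

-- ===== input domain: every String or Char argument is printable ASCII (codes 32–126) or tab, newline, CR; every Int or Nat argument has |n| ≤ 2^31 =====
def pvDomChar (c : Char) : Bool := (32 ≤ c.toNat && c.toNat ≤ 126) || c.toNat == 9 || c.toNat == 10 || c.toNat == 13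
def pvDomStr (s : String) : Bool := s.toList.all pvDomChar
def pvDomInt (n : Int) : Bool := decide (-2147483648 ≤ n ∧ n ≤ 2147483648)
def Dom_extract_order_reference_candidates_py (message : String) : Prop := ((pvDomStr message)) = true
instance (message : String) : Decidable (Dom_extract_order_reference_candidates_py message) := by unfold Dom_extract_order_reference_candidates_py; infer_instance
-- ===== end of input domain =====

-- B fuses everything into one index-based scan (two-pointer run detection, immediate normalize/
-- filter and set-based dedup) instead of A's two staged passes with an intermediate candidates list.

-- ===== PORT A =====
-- the token-character predicate char.isalnum() or char in {"-", "_", "#"} (both sources)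
def pvKeep (c : Char) : Bool :=
  PySem.Chars.isalnum c || c == '-' || c == '_' || c == '#'

-- the normalization candidate.strip().lstrip("#").rstrip(".,!?;:") (both sources);
-- lstrip("#") / rstrip(".,!?;:") ported by hand: drop leading/trailing characters of the given set (exact)
def pvLstripHash (cs : List Char) : List Char := cs.dropWhile (fun c => c == '#')
def pvPunct (c : Char) : Bool := c == '.' || c == ',' || c == '!' || c == '?' || c == ';' || c == ':'
def pvRstripPunct (cs : List Char) : List Char := (cs.reverse.dropWhile pvPunct).reverse
def pvNorm (s : String) : String :=
  String.ofList (pvRstripPunct (pvLstripHash (PySem.Chars.strip s.toList)))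

def extract_order_reference_candidates_py (message : String) : List String :=
  let st := message.toList.foldl
    (fun (st : List String × List Char) char =>
      if pvKeep char then (st.1, st.2 ++ [char])
      else if st.2.isEmpty then st
      else (st.1 ++ [String.ofList st.2], ([] : List Char)))
    ([], [])
  let candidates := if st.2.isEmpty then st.1 else st.1 ++ [String.ofList st.2]
  candidates.foldl
    (fun normalized candidate =>
      let stripped := pvNorm candidate
      if PySem.Str.len stripped < 4 || !(stripped.toList.any PySem.Chars.isdigit) then normalized
      else if normalized.contains stripped then normalized
      else normalized ++ [stripped]) []

-- ===== PORT B =====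
-- B's outer while-loop over the index, with the inner two-pointer while-loop rendered as the run
-- c :: takeWhile (= message[i:j]) and the index jump i := j as recursing on dropWhile; the run is
-- normalized, filtered and dedup'd (seen : set) immediately — no intermediate candidates list.
def pvAltGo (cs : List Char) (seen : PySem.Set String) (out : List String) : List String :=
  match cs with
  | [] => out
  | c :: rest =>
    if pvKeep c then
      let stripped := pvNorm (String.ofList (c :: rest.takeWhile pvKeep))
      let rest' := rest.dropWhile pvKeep
      if 4 ≤ PySem.Str.len stripped ∧ stripped.toList.any PySem.Chars.isdigit = true
          ∧ PySem.Set.contains seen stripped = false then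
        pvAltGo rest' (PySem.Set.add seen stripped) (out ++ [stripped])
      else
        pvAltGo rest' seen out
    else
      pvAltGo rest seen out
termination_by cs.length
decreasing_by
  · simpa using Nat.lt_succ_of_le (List.length_dropWhile_le pvKeep rest)
  · simpa using Nat.lt_succ_of_le (List.length_dropWhile_le pvKeep rest)
  · simp

def extract_order_reference_candidates_py_alt (message : String) : List String :=
  pvAltGo message.toList PySem.Set.empty []

-- ===== PRECONDITION & SPEC =====
def Spec_extract_order_reference_candidates_py (message : String) (out : List String) : Prop := out = extract_order_reference_candidates_py_alt message
instance (message : String) (out : List String) : Decidable (Spec_extract_order_reference_candidates_py message out) := by unfold Spec_extract_order_reference_candidates_py; infer_instance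

-- ===== CLAIM (what is proved, stated in full; the proofs are below) =====
def Claim_equal_extract_order_reference_candidates_py : Prop := ∀ (message : String), Dom_extract_order_reference_candidates_py message → Spec_extract_order_reference_candidates_py message (extract_order_reference_candidates_py message)

-- ===== LEMMAS AND PROOFS =====

-- the list of maximal pvKeep-runs of a character list (cur = the reversed pending partial run)
def pvTokAux : List Char → List Char → List (List Char)
  | [], cur => if cur.isEmpty then [] else [cur.reverse]
  | c :: rest, cur =>
    if pvKeep c then pvTokAux rest (c :: cur)
    else if cur.isEmpty then pvTokAux rest []
    else cur.reverse :: pvTokAux rest []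

-- A's normalize/filter/dedup step, as a function of the raw token
def pvAStep (normalized : List String) (tok : List Char) : List String :=
  let stripped := pvNorm (String.ofList tok)
  if PySem.Str.len stripped < 4 || !(stripped.toList.any PySem.Chars.isdigit) then normalized
  else if normalized.contains stripped then normalized
  else normalized ++ [stripped]

-- A's tokenizing fold (with its trailing flush) computes exactly the maximal runs
theorem pvTokA (cs : List Char) (cands : List String) (tok : List Char) :
    (let st := cs.foldl
        (fun (st : List String × List Char) char =>
          if pvKeep char then (st.1, st.2 ++ [char])
          else if st.2.isEmpty then st
          else (st.1 ++ [String.ofList st.2], ([] : List Char)))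
        (cands, tok)
     if st.2.isEmpty then st.1 else st.1 ++ [String.ofList st.2])
    = cands ++ (pvTokAux cs tok.reverse).map String.ofList := by
  induction cs generalizing cands tok with
  | nil =>
    simp only [List.foldl_nil, pvTokAux, List.isEmpty_reverse]
    by_cases h : tok.isEmpty <;> simp [h]
  | cons c rest ih =>
    simp only [List.foldl_cons, pvTokAux]
    by_cases hk : pvKeep c
    · simp only [hk, if_true]
      rw [show (c :: tok.reverse) = (tok ++ [c]).reverse by simp]
      exact ih cands (tok ++ [c])
    · simp only [hk, Bool.false_eq_true, if_false, List.isEmpty_reverse]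
      by_cases ht : tok.isEmpty
      · simp only [ht, if_true]
        have := ih cands tok
        simp [List.isEmpty_iff.mp ht] at this ⊢
        exact this
      · simp only [ht, Bool.false_eq_true, if_false, List.reverse_reverse]
        have := ih (cands ++ [String.ofList tok]) []
        simp only [List.reverse_nil] at this
        rw [this]
        simp
-- inside a run, pvTokAux outputs the whole maximal run and continues after it
theorem pvTokAux_run (rest : List Char) (cur : List Char) (h : cur.isEmpty = false) :
    pvTokAux rest cur
      = (cur.reverse ++ rest.takeWhile pvKeep) :: pvTokAux (rest.dropWhile pvKeep) [] := by
  induction rest generalizing cur with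
  | nil => simp [pvTokAux, h]
  | cons c r ih =>
    by_cases hk : pvKeep c
    · simp only [pvTokAux, hk, if_true, List.takeWhile_cons, List.dropWhile_cons]
      rw [ih (c :: cur) (by simp)]
      simp
    · simp only [pvTokAux, hk, Bool.false_eq_true, if_false, h, List.takeWhile_cons,
        List.dropWhile_cons]
      simp

-- B's fused scan equals A's step folded over the maximal runs (seen keeps exactly out's elements)
theorem pvAltGo_eq (cs : List Char) : ∀ (out : List String),
    pvAltGo cs out out = (pvTokAux cs []).foldl pvAStep out := by
  induction hn : cs.length using Nat.strong_induction_on generalizing cs with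
  | _ n ih =>
    intro out
    match cs with
    | [] => simp [pvAltGo, pvTokAux]
    | c :: rest =>
      by_cases hk : pvKeep c
      · rw [pvAltGo]
        simp only [hk, if_true]
        have hrun : pvTokAux (c :: rest) [] = (c :: rest.takeWhile pvKeep)
            :: pvTokAux (rest.dropWhile pvKeep) [] := by
          simp only [pvTokAux, hk, if_true]
          rw [pvTokAux_run rest [c] (by simp)]
          simp
        rw [hrun, List.foldl_cons]
        have hlen : (rest.dropWhile pvKeep).length < n := by
          subst hn
          simpa using Nat.lt_succ_of_le (List.length_dropWhile_le pvKeep rest)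
        set stripped := pvNorm (String.ofList (c :: rest.takeWhile pvKeep)) with hs
        by_cases hgood : 4 ≤ PySem.Str.len stripped ∧ stripped.toList.any PySem.Chars.isdigit = true
            ∧ PySem.Set.contains out stripped = false
        · rw [if_pos hgood]
          have hc' : out.contains stripped = false := hgood.2.2
          have hadd : PySem.Set.add out stripped = out ++ [stripped] := by
            simp [PySem.Set.add, PySem.Set.contains, List.contains_eq_mem] at hc' ⊢
            intro hmem
            exact absurd hmem hc'
          have h1 : (decide (PySem.Str.len stripped < 4)
              || !(stripped.toList.any PySem.Chars.isdigit)) = false := by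
            simp only [hgood.2.1, Bool.not_true, Bool.or_false, decide_eq_false_iff_not]
            exact not_lt.mpr hgood.1
          have hstep : pvAStep out (c :: rest.takeWhile pvKeep) = out ++ [stripped] := by
            simp only [pvAStep, ← hs, h1, Bool.false_eq_true, if_false, hc']
          rw [hadd, hstep, ih _ hlen _ rfl]
        · rw [if_neg hgood]
          have hstep : pvAStep out (c :: rest.takeWhile pvKeep) = out := by
            simp only [pvAStep, ← hs]
            by_cases h1 : (decide (PySem.Str.len stripped < 4)
                || !(stripped.toList.any PySem.Chars.isdigit)) = true
            · rw [h1]; simp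
            · rw [Bool.eq_false_iff.mpr h1]
              simp only [Bool.false_eq_true, if_false]
              simp only [Bool.or_eq_true, decide_eq_true_eq, Bool.not_eq_true'] at h1
              push_neg at h1
              have hcont : out.contains stripped = true := by
                by_contra hc
                exact hgood ⟨h1.1, Bool.ne_false_iff.mp h1.2, Bool.eq_false_iff.mpr hc⟩
              simp only [hcont, if_true]
          rw [hstep, ih _ hlen _ rfl]
      · rw [pvAltGo]
        simp only [hk, Bool.false_eq_true, if_false]
        have : pvTokAux (c :: rest) [] = pvTokAux rest [] := by
          simp [pvTokAux, hk]
        rw [this, ih rest.length (by simp [← hn]) rest rfl]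

-- ===== VERDICT (by name: the statement is the Claim_ definition above) =====
theorem extract_order_reference_candidates_py_spec : Claim_equal_extract_order_reference_candidates_py := by
  intro message _
  unfold Spec_extract_order_reference_candidates_py
  show extract_order_reference_candidates_py message = extract_order_reference_candidates_py_alt message
  have h := pvTokA message.toList [] []
  simp only [List.reverse_nil, List.nil_append] at h
  simp only [extract_order_reference_candidates_py, extract_order_reference_candidates_py_alt]
  rw [h]
  have he : (PySem.Set.empty : PySem.Set String) = [] := rfl
  rw [he, pvAltGo_eq message.toList []]
  rw [List.foldl_map]
  rfl
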